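-- pv_equiv track=rewrite | github.com/bsagrans/CompSciFinal | Final Project Milestone 2.py | decode_chars
-- ===== SOURCE A (Python) =====
-- def even_or_odd_bit(number: int) -> str:
--     ''' consumes an int and returns a str. If the number passed is odd,
--     this function should return a '1' and if its even, it should return a '0';'''
--     if number % 2 == 0:
--         return "0"
--     else:
--         return "1"
--
-- def decode_single_char(color_intensities: list[int]) -> str:
--     '''consumes a list of integers containing eight color intensities values (Base 10).
--     These color intensities represent a single ascii character as described in the Part
--     A Decoding: Decoding Process page'''
--     if len(color_intensities) != 8:
--         return ""
--     new_colors = ""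
--     for colors in color_intensities:
--         new_colors += even_or_odd_bit(colors)
--     return chr(int(new_colors, 2))
--
-- def decode_chars(color_intensities: list[int], number_characters: int) -> str:
--     '''consumes a list of integers of color intensity values and an integer representing how many characters to decode.
--     gThis function should call decode_single_char for each character that needs to be decoded '''
--     decoded = ""
--     if len(color_intensities) != (8 * number_characters):
--         return None
--     for colors in range(number_characters):
--         current_position = colors * 8
--         decoded += decode_single_char(color_intensities[current_position:current_position + 8])
--     return decoded
-- ===== SOURCE B (Python) =====
-- def decode_chars(color_intensities: list[int], number_characters: int) -> str:
--     '''Single flat pass: accumulate each bit parity into an integer and emit a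
--     character every 8 intensities; no slicing, no intermediate bit strings.'''
--     if len(color_intensities) != 8 * number_characters:
--         return None
--     decoded = ""
--     value = 0
--     count = 0
--     for c in color_intensities:
--         value = value * 2 + (1 if c % 2 != 0 else 0)
--         count += 1
--         if count == 8:
--             decoded += chr(value)
--             value = 0
--             count = 0
--     return decoded
-- ===== Notes on version B (the rewrite author's own statement) =====
-- stated objective: simpler
-- what changed: Replaces the per-character slicing into 8-element groups, the helper functions and the intermediate binary string parsed with int(.,2) by one flat pass over the list that accumulates bit parities into an integer and emits chr(value) every 8th element.
import Mathlib
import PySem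

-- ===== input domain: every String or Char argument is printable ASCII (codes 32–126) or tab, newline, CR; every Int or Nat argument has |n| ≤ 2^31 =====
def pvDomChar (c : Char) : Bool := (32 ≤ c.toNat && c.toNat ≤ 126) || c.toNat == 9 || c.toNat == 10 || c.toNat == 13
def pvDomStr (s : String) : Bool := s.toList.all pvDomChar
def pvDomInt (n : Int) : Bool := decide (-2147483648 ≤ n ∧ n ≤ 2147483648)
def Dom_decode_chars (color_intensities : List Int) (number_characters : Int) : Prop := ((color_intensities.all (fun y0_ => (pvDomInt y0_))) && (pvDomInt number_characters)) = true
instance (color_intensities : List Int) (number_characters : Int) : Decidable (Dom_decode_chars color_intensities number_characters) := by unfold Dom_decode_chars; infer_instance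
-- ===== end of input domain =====

-- B replaces A's slice-into-8-groups / bit-string / int(.,2) pipeline by one flat pass
-- accumulating bit parities into an integer (objective: simpler).


-- ===== PORT A =====
def even_or_odd_bit (number : Int) : String :=
  if PySem.Int.mod number 2 = 0 then "0" else "1"

-- hand port of int(s, 2): exact on strings of '0'/'1' digits, the only strings A feeds it
def pvParseBin2 (s : String) : Nat :=
  s.toList.foldl (fun v ch => v * 2 + (if ch = '1' then 1 else 0)) 0

def decode_single_char (color_intensities : List Int) : String :=
  if color_intensities.length ≠ 8 then ""
  else
    let new_colors := color_intensities.foldl (fun nc colors => nc ++ even_or_odd_bit colors) ""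
    String.singleton (Char.ofNat (pvParseBin2 new_colors))

def decode_chars (color_intensities : List Int) (number_characters : Int) : Option String :=
  if (color_intensities.length : Int) ≠ 8 * number_characters then none
  else some ((PySem.List.pyRange 0 number_characters 1).foldl
    (fun decoded colors =>
      decoded ++ decode_single_char
        (PySem.List.slice color_intensities (some (colors * 8)) (some (colors * 8 + 8)))) "")

-- ===== PORT B =====
-- the body of B's for-loop (named so the proofs can speak about single steps)
def pvStep (st : Int × Int × String) (c : Int) : Int × Int × String :=
  let value := st.1 * 2 + (if PySem.Int.mod c 2 ≠ 0 then 1 else 0)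
  let count := st.2.1 + 1
  if count = 8 then (0, 0, st.2.2 ++ String.singleton (Char.ofNat value.toNat))
  else (value, count, st.2.2)

def decode_chars_alt (color_intensities : List Int) (number_characters : Int) : Option String :=
  if (color_intensities.length : Int) ≠ 8 * number_characters then none
  else some (color_intensities.foldl pvStep ((0 : Int), (0 : Int), "")).2.2

-- ===== PRECONDITION & SPEC =====
def Spec_decode_chars (color_intensities : List Int) (number_characters : Int) (out : Option String) : Prop := out = decode_chars_alt color_intensities number_characters
instance (color_intensities : List Int) (number_characters : Int) (out : Option String) : Decidable (Spec_decode_chars color_intensities number_characters out) := by unfold Spec_decode_chars; infer_instance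

-- ===== CLAIM (what is proved, stated in full; the proofs are below) =====
def Claim_equal_decode_chars : Prop := ∀ (color_intensities : List Int) (number_characters : Int), Dom_decode_chars color_intensities number_characters → Spec_decode_chars color_intensities number_characters (decode_chars color_intensities number_characters)

-- ===== LEMMAS AND PROOFS =====

-- common spec: the decoded string of a list, one char per complete 8-group
def pvBit (c : Int) : Int := if PySem.Int.mod c 2 ≠ 0 then 1 else 0

def pvVal8 (a b c d e f g h : Int) : Int :=
  ((((((((0 : Int) * 2 + pvBit a) * 2 + pvBit b) * 2 + pvBit c) * 2 + pvBit d) * 2 + pvBit e)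
      * 2 + pvBit f) * 2 + pvBit g) * 2 + pvBit h

def pvGroups : List Int → String
  | a :: b :: c :: d :: e :: f :: g :: h :: t =>
      String.singleton (Char.ofNat (pvVal8 a b c d e f g h).toNat) ++ pvGroups t
  | _ => ""

theorem pvBit_nonneg (c : Int) : 0 ≤ pvBit c ∧ pvBit c ≤ 1 := by
  unfold pvBit; split <;> omega

-- A's bit-string parse agrees with the integer accumulation
theorem pvParse_step (s : String) (c : Int) :
    pvParseBin2 (s ++ even_or_odd_bit c) = pvParseBin2 s * 2 + (pvBit c).toNat := by
  unfold pvParseBin2 even_or_odd_bit pvBit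
  rcases Int.emod_two_eq c with h | h <;>
    simp [h, List.foldl_append]

theorem pvParse_fold (l : List Int) (s : String) :
    pvParseBin2 (l.foldl (fun nc colors => nc ++ even_or_odd_bit colors) s) =
      l.foldl (fun v c => v * 2 + (pvBit c).toNat) (pvParseBin2 s) := by
  induction l generalizing s with
  | nil => rfl
  | cons x t ih => simp only [List.foldl_cons, ih, pvParse_step]

-- decode_single_char on an explicit 8-list is the group character
theorem decode_single_char_eq (a b c d e f g h : Int) :
    decode_single_char [a, b, c, d, e, f, g, h] =
      String.singleton (Char.ofNat (pvVal8 a b c d e f g h).toNat) := by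
  have hp : pvParseBin2 (List.foldl (fun nc colors => nc ++ even_or_odd_bit colors) ""
      [a, b, c, d, e, f, g, h]) = (pvVal8 a b c d e f g h).toNat := by
    rw [pvParse_fold]
    simp only [List.foldl_cons, List.foldl_nil]
    rw [show pvParseBin2 "" = 0 from rfl]
    have hcast : ∀ x : Int, (((pvBit x).toNat : Nat) : Int) = pvBit x := fun x =>
      Int.toNat_of_nonneg (pvBit_nonneg x).1
    refine Eq.trans (Int.toNat_natCast _).symm ?_
    congr 1
    unfold pvVal8
    push_cast [hcast]
    ring
  unfold decode_single_char
  rw [if_neg (by norm_num)]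
  simp only [hp]

theorem pvGroups_append8 (a b c d e f g h : Int) (t : List Int) :
    pvGroups (a :: b :: c :: d :: e :: f :: g :: h :: t) =
      String.singleton (Char.ofNat (pvVal8 a b c d e f g h).toNat) ++ pvGroups t := rfl

-- destructure a list of length 8*(k+1) into its first 8 elements
theorem pvDestruct8 (l : List Int) (k : Nat) (hl : l.length = 8 * (k + 1)) :
    ∃ a b c d e f g h t, l = a :: b :: c :: d :: e :: f :: g :: h :: t ∧ t.length = 8 * k := by
  match l with
  | a :: b :: c :: d :: e :: f :: g :: h :: t =>
      exact ⟨a, b, c, d, e, f, g, h, t, rfl, by simp at hl; omega⟩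
  | [] | [_] | [_,_] | [_,_,_] | [_,_,_,_] | [_,_,_,_,_] | [_,_,_,_,_,_] | [_,_,_,_,_,_,_] =>
      simp at hl <;> omega

-- B's flat fold produces the group string
theorem pvBfold (k : Nat) (l : List Int) (acc : String) (hl : l.length = 8 * k) :
    l.foldl pvStep (0, 0, acc) = (0, 0, acc ++ pvGroups l) := by
  induction k generalizing l acc with
  | zero =>
      have : l = [] := List.length_eq_zero_iff.mp (by omega)
      subst this; simp [pvGroups]
  | succ k ih =>
      obtain ⟨a, b, c, d, e, f, g, h, t, rfl, ht⟩ := pvDestruct8 l k hl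
      have h8 : List.foldl pvStep (0, 0, acc) (a :: b :: c :: d :: e :: f :: g :: h :: t) =
          List.foldl pvStep
            (0, 0, acc ++ String.singleton (Char.ofNat (pvVal8 a b c d e f g h).toNat)) t := by
        simp only [List.foldl_cons]
        congr 1
      rw [h8, ih t _ ht, pvGroups_append8]
      rw [String.append_assoc]

-- pvGroups splits across a prefix of length 8*m
theorem pvGroups_append_mul8 (m : Nat) (p s : List Int) (hp : p.length = 8 * m) :
    pvGroups (p ++ s) = pvGroups p ++ pvGroups s := by
  induction m generalizing p with
  | zero =>
      have : p = [] := List.length_eq_zero_iff.mp (by omega)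
      subst this; simp [pvGroups]
  | succ m ih =>
      obtain ⟨a, b, c, d, e, f, g, h, t, rfl, ht⟩ := pvDestruct8 p m hp
      simp only [List.cons_append, pvGroups_append8, ih t ht, String.append_assoc]

-- A's ranged loop over slices produces the group string of the taken prefix
theorem pvAloop (ci : List Int) (k : Nat) (hk : 8 * k ≤ ci.length) :
    (PySem.List.pyRange 0 (k : Int) 1).foldl
      (fun decoded colors =>
        decoded ++ decode_single_char
          (PySem.List.slice ci (some (colors * 8)) (some (colors * 8 + 8)))) "" =
    pvGroups (ci.take (8 * k)) := by
  induction k with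
  | zero => simp [PySem.List.pyRange_one_eq_nil le_rfl, pvGroups]
  | succ k ih =>
      have h0 : ((k + 1 : Nat) : Int) = (k : Int) + 1 := by push_cast; ring
      rw [h0, PySem.List.pyRange_one_succ_right (by positivity), List.foldl_append,
        ih (by omega)]
      simp only [List.foldl_cons, List.foldl_nil]
      have hs : PySem.List.slice ci (some ((k : Int) * 8)) (some ((k : Int) * 8 + 8)) =
          (ci.drop (8 * k)).take 8 := by
        have h1 : ((k : Int) * 8) = ((8 * k : Nat) : Int) := by push_cast; ring
        have h2 : ((k : Int) * 8 + 8) = ((8 * k + 8 : Nat) : Int) := by push_cast; ring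
        rw [h2, h1, PySem.List.slice_natCast]
        congr 1; omega
      rw [hs]
      have hlen : ((ci.drop (8 * k)).take 8).length = 8 * (0 + 1) := by
        simp; omega
      obtain ⟨a, b, c, d, e, f, g, h, t, hchunk, ht⟩ := pvDestruct8 _ 0 (by omega)
      have ht0 : t = [] := List.length_eq_zero_iff.mp (by omega)
      subst ht0
      have htake : ci.take (8 * (k + 1)) = ci.take (8 * k) ++ (ci.drop (8 * k)).take 8 := by
        conv_lhs => rw [← List.take_append_drop (8 * k) ci]
        rw [List.take_append]
        congr 1
        · rw [List.take_take]; congr 1; omega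
        · congr 1; simp; omega
      rw [hchunk, decode_single_char_eq, htake, hchunk,
        pvGroups_append_mul8 k _ _ (by simp; omega), pvGroups_append8]
      simp [pvGroups]

-- ===== VERDICT (by name: the statement is the Claim_ definition above) =====
theorem decode_chars_spec : Claim_equal_decode_chars := by
  intro ci n _
  unfold Spec_decode_chars decode_chars decode_chars_alt
  by_cases hlen : (ci.length : Int) ≠ 8 * n
  · simp [hlen]
  · replace hlen : (ci.length : Int) = 8 * n := not_ne_iff.mp hlen
    simp only [hlen, ne_eq, not_true_eq_false, if_false]
    have hk : ci.length = 8 * n.toNat := by omega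
    have hcast : n = ((n.toNat : Nat) : Int) := by omega
    rw [hcast, pvAloop ci n.toNat (le_of_eq hk.symm),
      pvBfold n.toNat ci "" hk, List.take_of_length_le (le_of_eq hk)]
    simp
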